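-- pv_equiv track=rewrite | github.com/maddomo/Alpha-Zero-Laniakea | laniakea/LaniakeaHelper.py | get_stack_height
-- ===== SOURCE A (Python) =====
-- def get_stack_height(n):
--     count = 0
--     while n > 0:
--         nibble = n & 0xF  # mask lowest 4 bits
--         if nibble != 0:
--             count += 1
--         n >>= 4  # shift right by 4 bits (1 nibble)
--     return count
-- ===== SOURCE B (Python) =====
-- def get_stack_height(n):
--     if n <= 0:
--         return 0
--     return sum(c != '0' for c in format(n, 'x'))
-- ===== Notes on version B (the rewrite author's own statement) =====
-- stated objective: idiomatic
-- what changed: Replaces the mask-and-shift loop with counting the nonzero digits of the hexadecimal string representation (format(n,'x')), each hex digit being one nibble.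
import Mathlib
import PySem

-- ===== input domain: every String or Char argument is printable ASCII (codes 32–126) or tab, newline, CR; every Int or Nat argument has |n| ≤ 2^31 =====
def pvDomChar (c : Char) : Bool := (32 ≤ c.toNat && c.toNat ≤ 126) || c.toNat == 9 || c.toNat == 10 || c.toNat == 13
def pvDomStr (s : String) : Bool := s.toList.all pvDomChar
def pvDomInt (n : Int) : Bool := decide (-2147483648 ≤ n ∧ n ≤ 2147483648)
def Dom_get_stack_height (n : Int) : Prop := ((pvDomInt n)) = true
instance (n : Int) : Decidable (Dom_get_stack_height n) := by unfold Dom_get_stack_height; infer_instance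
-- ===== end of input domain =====

-- B counts nonzero hex digits of n (idiomatic rewrite, same cost); equivalence with A's mask-and-shift loop proved on all Int.

-- ===== PORT A =====
-- while n > 0: nibble = n & 0xF; if nibble != 0: count += 1; n >>= 4
-- for n > 0, Python's n & 0xF is n % 16 (Int.emod) and n >> 4 is n / 16 (Int.ediv): exact here
def get_stack_height_loop (n : Int) (count : Int) : Int :=
  if h : n > 0 then
    let nibble := n % 16
    get_stack_height_loop (n / 16) (if nibble ≠ 0 then count + 1 else count)
  else count
termination_by n.toNat
decreasing_by
  omega

def get_stack_height (n : Int) : Int := get_stack_height_loop n 0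

-- ===== PORT B =====
-- format(n, 'x') for n > 0, ported by hand: hex digit characters, most significant first (exact for n > 0)
def pvHexChar (d : Int) : Char :=
  Char.ofNat (if d < 10 then 48 + d.toNat else 87 + d.toNat)

def pvHexStr (n : Int) : List Char :=
  if _h : n > 0 then pvHexStr (n / 16) ++ [pvHexChar (n % 16)] else []
termination_by n.toNat
decreasing_by
  omega

def get_stack_height_alt (n : Int) : Int :=
  if n ≤ 0 then 0
  else ((pvHexStr n).countP (fun c => c ≠ '0') : Int)

-- ===== PRECONDITION & SPEC =====
def Spec_get_stack_height (n : Int) (out : Int) : Prop := out = get_stack_height_alt n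
instance (n : Int) (out : Int) : Decidable (Spec_get_stack_height n out) := by unfold Spec_get_stack_height; infer_instance

-- ===== CLAIM (what is proved, stated in full; the proofs are below) =====
def Claim_equal_get_stack_height : Prop := ∀ (n : Int), Dom_get_stack_height n → Spec_get_stack_height n (get_stack_height n)

-- ===== LEMMAS AND PROOFS =====

theorem pvHexChar_eq_zero_iff (d : Int) (h0 : 0 ≤ d) (h16 : d < 16) :
    (pvHexChar d = '0') ↔ d = 0 := by
  interval_cases d <;> decide

theorem pvHexStr_countP (n : Int) :
    ((pvHexStr n).countP (fun c => c ≠ '0') : Int) =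
      if n > 0 then ((pvHexStr (n / 16)).countP (fun c => c ≠ '0') : Int)
        + (if n % 16 ≠ 0 then 1 else 0) else 0 := by
  by_cases h : n > 0
  · rw [pvHexStr]
    simp only [h, dif_pos, if_pos]
    rw [List.countP_append]
    have hm0 : 0 ≤ n % 16 := Int.emod_nonneg n (by norm_num)
    have hm16 : n % 16 < 16 := Int.emod_lt_of_pos n (by norm_num)
    have hiff : (pvHexChar (n % 16) = '0') ↔ (n % 16 = 0) := pvHexChar_eq_zero_iff _ hm0 hm16
    simp only [List.countP_cons, List.countP_nil]
    by_cases hz : n % 16 = 0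
    · simp [hz]
    · have hne : ¬ (pvHexChar (n % 16) = '0') := fun hc => hz (hiff.mp hc)
      simp [hne, hz]
  · rw [pvHexStr]
    simp [h]

theorem loop_eq (k : Nat) : ∀ (n count : Int), n.toNat ≤ k →
    get_stack_height_loop n count =
      count + ((pvHexStr n).countP (fun c => c ≠ '0') : Int) := by
  induction k with
  | zero =>
    intro n count hk
    have hn : ¬ n > 0 := by omega
    rw [get_stack_height_loop, pvHexStr]
    simp [hn]
  | succ k ih =>
    intro n count hk
    by_cases h : n > 0
    · have hlt : (n / 16).toNat ≤ k := by omega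
      rw [get_stack_height_loop]
      simp only [h, dif_pos]
      rw [ih _ _ hlt]
      conv_rhs => rw [pvHexStr_countP n, if_pos h]
      by_cases hz : n % 16 = 0
      · simp [hz]
      · simp only [hz, if_true, ne_eq, not_false_eq_true]
        ring
    · rw [get_stack_height_loop, pvHexStr]
      simp [h]

-- ===== VERDICT (by name: the statement is the Claim_ definition above) =====
theorem get_stack_height_spec : Claim_equal_get_stack_height := by
  intro n _
  unfold Spec_get_stack_height get_stack_height get_stack_height_alt
  rw [loop_eq n.toNat n 0 le_rfl]
  by_cases h : n ≤ 0
  · have : ¬ n > 0 := by omega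
    rw [pvHexStr]
    simp [h, this]
  · simp [h]
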